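-- pv_equiv track=rewrite | github.com/TakumaMiwa/algorithm | string/sneak_string.py | sneak_string
-- ===== SOURCE A (Python) =====
-- def sneak_string(s):
--     if not s: return []
--     l1, l2, l3 = [], [s[0]], []
--     idx = 1
--     while idx < len(s):
--         l1.append(s[idx])
--         if idx + 1 < len(s): l2.append(s[idx+1])
--         if idx + 2 < len(s): l3.append(s[idx+2])
--         if idx + 3 < len(s): l2.append(s[idx+3])
--         idx += 4
--     return l1 + l2 + l3
-- ===== SOURCE B (Python) =====
-- def sneak_string(s):
--     n = len(s)
--     return ([s[i] for i in range(1, n, 4)]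
--             + [s[i] for i in range(0, n, 2)]
--             + [s[i] for i in range(3, n, 4)])
-- ===== Notes on version B (the rewrite author's own statement) =====
-- stated objective: simpler
-- what changed: Replaced A's single interleaved while-loop (index stepping by 4 with four in-range branches appending to three accumulators) by three independent strided range comprehensions: chars at indices 1,5,9,... then 0,2,4,... then 3,7,11,...; no empty-string special case is needed.
import Mathlib
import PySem

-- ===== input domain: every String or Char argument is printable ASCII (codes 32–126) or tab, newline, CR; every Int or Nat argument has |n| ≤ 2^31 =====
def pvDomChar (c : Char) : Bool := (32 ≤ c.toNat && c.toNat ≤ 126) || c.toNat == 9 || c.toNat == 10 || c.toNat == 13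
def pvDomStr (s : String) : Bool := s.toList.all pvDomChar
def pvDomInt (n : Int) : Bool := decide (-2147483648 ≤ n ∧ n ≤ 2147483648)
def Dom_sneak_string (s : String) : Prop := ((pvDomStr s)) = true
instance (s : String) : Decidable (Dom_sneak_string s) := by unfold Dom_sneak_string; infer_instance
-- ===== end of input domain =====

-- B replaces A's single interleaved index-and-branch while-loop by three independent
-- strided range comprehensions (objective: simpler); same return value; no side effects.

-- ===== PORT A =====
-- the while-loop: idx steps by 4, appending to l1/l2/l3 under the in-range guards
def snLoopA (cs : List Char) (idx : Nat) (l1 l2 l3 : List String) : List String :=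
  if h : idx < cs.length then
    let l1' := l1 ++ [String.mk [cs.getD idx ' ']]
    let l2' := if idx + 1 < cs.length then l2 ++ [String.mk [cs.getD (idx + 1) ' ']] else l2
    let l3' := if idx + 2 < cs.length then l3 ++ [String.mk [cs.getD (idx + 2) ' ']] else l3
    let l2'' := if idx + 3 < cs.length then l2' ++ [String.mk [cs.getD (idx + 3) ' ']] else l2'
    snLoopA cs (idx + 4) l1' l2'' l3'
  else l1 ++ l2 ++ l3
termination_by cs.length - idx
decreasing_by omega

def sneak_string (s : String) : List String :=
  let cs := s.toList
  if cs.isEmpty then []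
  else snLoopA cs 1 [] [String.mk [cs.getD 0 ' ']] []

-- ===== PORT B =====
def sneak_string_alt (s : String) : List String :=
  let cs := s.toList
  let n : Int := cs.length
  (PySem.List.pyRange 1 n 4).map (fun i => String.mk [PySem.List.pyGetD cs i ' '])
    ++ (PySem.List.pyRange 0 n 2).map (fun i => String.mk [PySem.List.pyGetD cs i ' '])
    ++ (PySem.List.pyRange 3 n 4).map (fun i => String.mk [PySem.List.pyGetD cs i ' '])

-- ===== PRECONDITION & SPEC =====
def Spec_sneak_string (s : String) (out : List String) : Prop := out = sneak_string_alt s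
instance (s : String) (out : List String) : Decidable (Spec_sneak_string s out) := by unfold Spec_sneak_string; infer_instance

-- ===== CLAIM (what is proved, stated in full; the proofs are below) =====
def Claim_equal_sneak_string : Prop := ∀ (s : String), Dom_sneak_string s → Spec_sneak_string s (sneak_string s)

-- ===== LEMMAS AND PROOFS =====

-- proof-side spec: every k-th element starting at the head (countdown-state helper)
def strideAux {α : Type} : List α → Nat → Nat → List α
  | [], _, _ => []
  | a :: rest, 0, k => a :: strideAux rest (k - 1) k
  | _ :: rest, c + 1, k => strideAux rest c k

def strideL {α : Type} (xs : List α) (k : Nat) : List α := strideAux xs 0 k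

theorem strideAux_skip {α : Type} (k : Nat) : ∀ (c : Nat) (t : List α),
    strideAux t c k = strideAux (t.drop c) 0 k := by
  intro c
  induction c with
  | zero => intro t; simp
  | succ c ih =>
    intro t
    cases t with
    | nil => simp [strideAux]
    | cons a rest => simpa [strideAux] using ih rest

@[simp] theorem strideL_nil {α : Type} (k : Nat) : strideL ([] : List α) k = [] := rfl

theorem strideL_cons {α : Type} (a : α) (t : List α) (k : Nat) :
    strideL (a :: t) k = a :: strideL (t.drop (k - 1)) k := by
  unfold strideL
  rw [strideAux, strideAux_skip]

theorem pyRange_pos_nil (a b k : Int) (hk : 0 < k) (h : b ≤ a) :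
    PySem.List.pyRange a b k = [] := by
  rw [PySem.List.pyRange_of_pos _ _ hk, if_neg (by omega)]
  simp

theorem pyRange_pos_cons (a b k : Int) (hk : 0 < k) (h : a < b) :
    PySem.List.pyRange a b k = a :: PySem.List.pyRange (a + k) b k := by
  rw [PySem.List.pyRange_of_pos _ _ hk, PySem.List.pyRange_of_pos _ _ hk, if_pos h]
  have h2 : 0 ≤ (b - a - 1) / k := Int.ediv_nonneg (by omega) (by omega)
  have h3 : (b - a + k - 1) / k = (b - a - 1) / k + 1 := by
    have h1 : b - a + k - 1 = (b - a - 1) + 1 * k := by ring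
    rw [h1, Int.add_mul_ediv_right _ _ (by omega)]
  by_cases hc : a + k < b
  · rw [if_pos hc]
    have he : b - (a + k) + k - 1 = b - a - 1 := by ring
    have ht : ((b - a + k - 1) / k).toNat = ((b - a - 1) / k).toNat + 1 := by
      rw [h3]; omega
    rw [he, ht, List.range_succ_eq_map]
    simp only [List.map_cons, List.map_map]
    rw [List.cons_eq_cons]
    refine ⟨by simp, ?_⟩
    apply List.map_congr_left
    intro j _
    simp only [Function.comp_apply, Nat.succ_eq_add_one]
    push_cast
    ring
  · rw [if_neg hc]
    have hz : (b - a - 1) / k = 0 :=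
      Int.ediv_eq_zero_of_lt (by omega) (by omega)
    have ht : ((b - a + k - 1) / k).toNat = 1 := by rw [h3, hz]; rfl
    rw [ht]
    simp

theorem range_map_stride (cs : List Char) (k : Nat) (hk : 0 < k) (a : Nat) :
    (PySem.List.pyRange (a : Int) (cs.length : Int) (k : Int)).map
        (fun i => String.mk [PySem.List.pyGetD cs i ' '])
      = (strideL (cs.drop a) k).map (fun c => String.mk [c]) := by
  have main : ∀ (fuel a : Nat), cs.length - a ≤ fuel →
      (PySem.List.pyRange (a : Int) (cs.length : Int) (k : Int)).map
          (fun i => String.mk [PySem.List.pyGetD cs i ' '])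
        = (strideL (cs.drop a) k).map (fun c => String.mk [c]) := by
    intro fuel
    induction fuel with
    | zero =>
      intro a hf
      have ha : cs.length ≤ a := by omega
      rw [pyRange_pos_nil _ _ _ (by exact_mod_cast hk) (by exact_mod_cast ha),
        List.drop_eq_nil_of_le ha]
      simp
    | succ f ih =>
      intro a hf
      by_cases ha : a < cs.length
      · rw [pyRange_pos_cons _ _ _ (by exact_mod_cast hk) (by exact_mod_cast ha)]
        rw [List.drop_eq_getElem_cons ha, strideL_cons]
        have hak : ((a : Int) + (k : Int)) = ((a + k : Nat) : Int) := by push_cast; ring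
        rw [hak]
        have hdd : (cs.drop (a + 1)).drop (k - 1) = cs.drop (a + k) := by
          rw [List.drop_drop]
          congr 1
          omega
        have hI := ih (a + k) (by omega)
        simp only [List.map_cons, hdd, hI]
        congr 1
        rw [PySem.List.pyGetD_natCast, List.getD_eq_getElem _ _ ha]
      · have ha' : cs.length ≤ a := by omega
        rw [pyRange_pos_nil _ _ _ (by exact_mod_cast hk) (by exact_mod_cast ha'),
          List.drop_eq_nil_of_le ha']
        simp
  exact main (cs.length - a) a (le_refl _)

theorem snLoopA_eq (cs : List Char) : ∀ (fuel idx : Nat) (l1 l2 l3 : List String),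
    cs.length - idx ≤ fuel →
    snLoopA cs idx l1 l2 l3 =
      (l1 ++ (strideL (cs.drop idx) 4).map (fun c => String.mk [c]))
        ++ ((l2 ++ (strideL (cs.drop (idx + 1)) 2).map (fun c => String.mk [c]))
          ++ (l3 ++ (strideL (cs.drop (idx + 2)) 4).map (fun c => String.mk [c]))) := by
  intro fuel
  induction fuel with
  | zero =>
    intro idx l1 l2 l3 hf
    have h : cs.length ≤ idx := by omega
    rw [snLoopA, dif_neg (by omega)]
    rw [List.drop_eq_nil_of_le h, List.drop_eq_nil_of_le (by omega),
      List.drop_eq_nil_of_le (by omega)]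
    simp
  | succ f ih =>
    intro idx l1 l2 l3 hf
    by_cases h : idx < cs.length
    · rw [snLoopA, dif_pos h]
      simp only []
      rw [ih (idx + 4) _ _ _ (by omega)]
      have e4 : idx + 4 + 1 = idx + 5 := by omega
      have e5 : idx + 4 + 2 = idx + 6 := by omega
      rw [e4, e5]
      -- l1 component
      have hl1 : strideL (cs.drop idx) 4 = cs[idx] :: strideL (cs.drop (idx + 4)) 4 := by
        rw [List.drop_eq_getElem_cons h, strideL_cons]
        rw [List.drop_drop]
      -- l2 component
      have hl2 : l2 ++ (strideL (cs.drop (idx + 1)) 2).map (fun c => String.mk [c]) =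
          (if idx + 3 < cs.length then
            (if idx + 1 < cs.length then l2 ++ [String.mk [cs.getD (idx + 1) ' ']] else l2)
              ++ [String.mk [cs.getD (idx + 3) ' ']]
           else (if idx + 1 < cs.length then l2 ++ [String.mk [cs.getD (idx + 1) ' ']] else l2))
            ++ (strideL (cs.drop (idx + 5)) 2).map (fun c => String.mk [c]) := by
        by_cases h1 : idx + 1 < cs.length
        · rw [if_pos h1]
          have s1 : strideL (cs.drop (idx + 1)) 2 =
              cs[idx + 1] :: strideL (cs.drop (idx + 3)) 2 := by
            rw [List.drop_eq_getElem_cons h1, strideL_cons]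
            rw [List.drop_drop]
          by_cases h3 : idx + 3 < cs.length
          · rw [if_pos h3]
            have s3 : strideL (cs.drop (idx + 3)) 2 =
                cs[idx + 3] :: strideL (cs.drop (idx + 5)) 2 := by
              rw [List.drop_eq_getElem_cons h3, strideL_cons]
              rw [List.drop_drop]
            rw [s1, s3, List.getD_eq_getElem _ _ h1, List.getD_eq_getElem _ _ h3]
            simp
          · rw [if_neg h3]
            have d3 : cs.drop (idx + 3) = [] := List.drop_eq_nil_of_le (by omega)
            have d5 : cs.drop (idx + 5) = [] := List.drop_eq_nil_of_le (by omega)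
            rw [s1, d3, d5, List.getD_eq_getElem _ _ h1]
            simp
        · rw [if_neg h1, if_neg (by omega)]
          rw [List.drop_eq_nil_of_le (show cs.length ≤ idx + 1 by omega),
            List.drop_eq_nil_of_le (show cs.length ≤ idx + 5 by omega)]
      -- l3 component
      have hl3 : l3 ++ (strideL (cs.drop (idx + 2)) 4).map (fun c => String.mk [c]) =
          (if idx + 2 < cs.length then l3 ++ [String.mk [cs.getD (idx + 2) ' ']] else l3)
            ++ (strideL (cs.drop (idx + 6)) 4).map (fun c => String.mk [c]) := by
        by_cases h2 : idx + 2 < cs.length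
        · rw [if_pos h2]
          have s2 : strideL (cs.drop (idx + 2)) 4 =
              cs[idx + 2] :: strideL (cs.drop (idx + 6)) 4 := by
            rw [List.drop_eq_getElem_cons h2, strideL_cons]
            rw [List.drop_drop]
          rw [s2, List.getD_eq_getElem _ _ h2]
          simp
        · rw [if_neg h2]
          rw [List.drop_eq_nil_of_le (show cs.length ≤ idx + 2 by omega),
            List.drop_eq_nil_of_le (show cs.length ≤ idx + 6 by omega)]
      rw [hl2, hl3, hl1, List.getD_eq_getElem _ _ h]
      simp
    · rw [snLoopA, dif_neg h]
      rw [List.drop_eq_nil_of_le (by omega), List.drop_eq_nil_of_le (by omega),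
        List.drop_eq_nil_of_le (by omega)]
      simp

-- ===== VERDICT (by name: the statement is the Claim_ definition above) =====
theorem sneak_string_spec : Claim_equal_sneak_string := by
  intro s _
  unfold Spec_sneak_string sneak_string sneak_string_alt
  cases hcs : s.toList with
  | nil =>
    simp only [hcs, List.isEmpty_nil, if_pos, List.length_nil, Nat.cast_zero]
    rw [pyRange_pos_nil 1 0 4 (by omega) (by omega),
      pyRange_pos_nil 0 0 2 (by omega) (by omega),
      pyRange_pos_nil 3 0 4 (by omega) (by omega)]
    simp
  | cons c rest =>
    simp only [hcs, List.isEmpty_cons, if_neg]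
    have hA := snLoopA_eq (c :: rest) ((c :: rest).length - 1) 1 [] [String.mk [(c :: rest).getD 0 ' ']] [] (le_refl _)
    rw [hA]
    have h1 := range_map_stride (c :: rest) 4 (by omega) 1
    have h0 := range_map_stride (c :: rest) 2 (by omega) 0
    have h3 := range_map_stride (c :: rest) 4 (by omega) 3
    norm_num at h1 h0 h3 ⊢
    rw [h1, h0, h3]
    have hs : strideL (c :: rest) 2 = c :: strideL (rest.drop 1) 2 := by
      rw [strideL_cons]
    rw [hs]
    have hd : rest.drop 1 = (c :: rest).drop 2 := by simp
    rw [hd]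
    simp [List.getD]
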